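-- pv_equiv track=rewrite | github.com/axeljen/genomics | vcf/functions.py | IUPAC
-- ===== SOURCE A (Python) =====
-- def IUPAC(alleles):
-- 	IUPAC = {
-- 		'M': ['A','C'],
-- 		'R': ['A','G'],
-- 		'W': ['A','T'],
-- 		'S': ['C','G'],
-- 		'Y': ['C','T'],
-- 		'K': ['G','T']
-- 	}
-- 	hit = False
-- 	for c in IUPAC:
-- 		if set(IUPAC[c]) == set(alleles):
-- 			code = c
-- 			hit = True
-- 	if hit == False:
-- 		code = "N"
-- 	return code
-- ===== SOURCE B (Python) =====
-- def IUPAC(alleles):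
-- 	table = {
-- 		('A', 'C'): 'M',
-- 		('A', 'G'): 'R',
-- 		('A', 'T'): 'W',
-- 		('C', 'G'): 'S',
-- 		('C', 'T'): 'Y',
-- 		('G', 'T'): 'K',
-- 	}
-- 	return table.get(tuple(sorted(set(alleles))), 'N')
-- ===== Notes on version B (the rewrite author's own statement) =====
-- stated objective: simpler
-- what changed: A scans all six table entries comparing sets per entry and keeps the last hit; B canonicalises the input once (sorted set) and does a single keyed dict lookup with default 'N'.
import Mathlib
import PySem

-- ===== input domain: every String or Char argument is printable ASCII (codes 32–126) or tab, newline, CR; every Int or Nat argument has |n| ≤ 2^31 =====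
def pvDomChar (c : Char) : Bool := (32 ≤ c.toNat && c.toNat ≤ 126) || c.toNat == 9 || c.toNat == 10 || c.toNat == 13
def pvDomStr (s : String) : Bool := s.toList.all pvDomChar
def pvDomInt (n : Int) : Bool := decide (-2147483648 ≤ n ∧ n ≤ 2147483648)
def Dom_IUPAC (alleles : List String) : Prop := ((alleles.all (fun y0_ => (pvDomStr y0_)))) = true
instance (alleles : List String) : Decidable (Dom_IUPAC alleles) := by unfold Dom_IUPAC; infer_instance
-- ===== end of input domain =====

-- B replaces A's scan over all six table entries (one set comparison per entry, last hit kept)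
-- by a single keyed lookup of the canonical key tuple(sorted(set(alleles))), default 'N'.

-- ===== PORT A =====
-- A: iterate over the dict's codes, compare each entry's allele set with set(alleles),
-- remember the last hit; "N" if no hit ('code' starts unbound, modelled by the dummy "").
def IUPAC (alleles : List String) : String :=
  let iupac : List (String × List String) :=
    [("M", ["A","C"]), ("R", ["A","G"]), ("W", ["A","T"]),
     ("S", ["C","G"]), ("Y", ["C","T"]), ("K", ["G","T"])]
  let st := iupac.foldl
    (fun (st : Bool × String) p =>
      if PySem.Set.equal (PySem.Set.ofList p.2) (PySem.Set.ofList alleles) then (true, p.1) else st)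
    (false, "")
  if st.1 = false then "N" else st.2

-- ===== PORT B =====
-- B: table.get(tuple(sorted(set(alleles))), 'N') — one keyed lookup of the canonical key.
def IUPAC_alt (alleles : List String) : String :=
  let table : PySem.Dict (List String) String :=
    PySem.Dict.ofList
      [(["A","C"], "M"), (["A","G"], "R"), (["A","T"], "W"),
       (["C","G"], "S"), (["C","T"], "Y"), (["G","T"], "K")]
  table.getD (PySem.List.sorted (PySem.Set.ofList alleles) (fun x => x) false) "N"

-- ===== PRECONDITION & SPEC =====
def Spec_IUPAC (alleles : List String) (out : String) : Prop := out = IUPAC_alt alleles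
instance (alleles : List String) (out : String) : Decidable (Spec_IUPAC alleles out) := by unfold Spec_IUPAC; infer_instance

-- ===== CLAIM (what is proved, stated in full; the proofs are below) =====
def Claim_equal_IUPAC : Prop := ∀ (alleles : List String), Dom_IUPAC alleles → Spec_IUPAC alleles (IUPAC alleles)

-- ===== LEMMAS AND PROOFS =====

-- A's per-entry test 'set([x,y]) == set(alleles)' holds exactly when B's canonical key
-- sorted(set(alleles)) equals the (already sorted, duplicate-free) pair [x, y].
lemma equal_pair_iff (x y : String) (hlt : x < y) (alleles : List String) :
    PySem.Set.equal (PySem.Set.ofList [x, y]) (PySem.Set.ofList alleles)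
      = decide (PySem.List.sorted (PySem.Set.ofList alleles) (fun a => a) false = [x, y]) := by
  rw [Bool.eq_iff_iff, PySem.Set.equal_iff, decide_eq_true_eq]
  constructor
  · intro h
    apply PySem.List.sorted_eq_of_perm_of_pairwise_lt
    · refine (List.perm_ext_iff_of_nodup ?_ (PySem.Set.nodup_ofList _)).mpr ?_
      · exact List.nodup_cons.mpr ⟨by simp [ne_of_lt hlt], List.nodup_singleton y⟩
      · intro a
        rw [← h]
        simp [PySem.Set.mem_ofList]
    · simp only [List.pairwise_cons, List.mem_singleton, forall_eq]
      exact ⟨hlt, by simp, by simp⟩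
  · intro h a
    have hp := PySem.List.sorted_perm (PySem.Set.ofList alleles) (fun a => a) false
    rw [h] at hp
    simp [PySem.Set.mem_ofList, hp.mem_iff.symm]

-- the equivalence on every input: case analysis on the canonical key
theorem IUPAC_eq_alt (alleles : List String) : IUPAC alleles = IUPAC_alt alleles := by
  have hM := equal_pair_iff "A" "C" (String.lt_iff_toList_lt.mpr (by decide)) alleles
  have hR := equal_pair_iff "A" "G" (String.lt_iff_toList_lt.mpr (by decide)) alleles
  have hW := equal_pair_iff "A" "T" (String.lt_iff_toList_lt.mpr (by decide)) alleles
  have hS := equal_pair_iff "C" "G" (String.lt_iff_toList_lt.mpr (by decide)) alleles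
  have hY := equal_pair_iff "C" "T" (String.lt_iff_toList_lt.mpr (by decide)) alleles
  have hK := equal_pair_iff "G" "T" (String.lt_iff_toList_lt.mpr (by decide)) alleles
  unfold IUPAC IUPAC_alt
  simp only [List.foldl_cons, List.foldl_nil, hM, hR, hW, hS, hY, hK]
  generalize (PySem.List.sorted (PySem.Set.ofList alleles) (fun a => a) false) = t
  by_cases h1 : t = ["A","C"]
  · subst h1; decide
  by_cases h2 : t = ["A","G"]
  · subst h2; decide
  by_cases h3 : t = ["A","T"]
  · subst h3; decide
  by_cases h4 : t = ["C","G"]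
  · subst h4; decide
  by_cases h5 : t = ["C","T"]
  · subst h5; decide
  by_cases h6 : t = ["G","T"]
  · subst h6; decide
  have htab : (PySem.Dict.ofList
      [(["A","C"], "M"), (["A","G"], "R"), (["A","T"], "W"),
       (["C","G"], "S"), (["C","T"], "Y"), (["G","T"], "K")] : PySem.Dict (List String) String)
    = (((((PySem.Dict.empty.insert ["A","C"] "M").insert ["A","G"] "R").insert ["A","T"] "W").insert
          ["C","G"] "S").insert ["C","T"] "Y").insert ["G","T"] "K" := by decide
  rw [htab]
  simp [PySem.Dict.getD_insert, PySem.Dict.getD_empty, h1, h2, h3, h4, h5, h6]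

-- ===== VERDICT (by name: the statement is the Claim_ definition above) =====
theorem IUPAC_spec : Claim_equal_IUPAC := by
  intro alleles _
  exact IUPAC_eq_alt alleles
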